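-- pv_equiv track=rewrite | github.com/Brentlyw/FerriteLoader | src/Encoder.py | nibble_encode
-- ===== SOURCE A (Python) =====
-- ALPHABET = "ABCDEFGHIJKLMNOPQRSTUVWXYZabcdefghijklmnopqrstuvwxyz0123456789+/"
--
-- def encode_byte(byte, key):
--     byte = ((byte ^ key) >> 3 | (byte ^ key) << 5) & 0xFF
--     return byte
--
-- def nibble_encode(data, seed=0xA5):
--     encoded = []
--     feedback = seed
--     for byte in data:
--         obfuscated_byte = encode_byte(byte, feedback)
--         high_nibble = (obfuscated_byte >> 4) & 0x0F
--         low_nibble = obfuscated_byte & 0x0F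
--         encoded.append(ALPHABET[high_nibble])
--         encoded.append(ALPHABET[low_nibble])
--         feedback = (feedback + byte) & 0xFF
--     return ''.join(encoded)
-- ===== SOURCE B (Python) =====
-- ALPHABET = "ABCDEFGHIJKLMNOPQRSTUVWXYZabcdefghijklmnopqrstuvwxyz0123456789+/"
--
-- def _pair(byte, key):
--     x = byte ^ key
--     ob = ((x >> 3) | (x << 5)) & 0xFF
--     return ALPHABET[(ob >> 4) & 0x0F] + ALPHABET[ob & 0x0F]
--
-- def nibble_encode(data, seed=0xA5):
--     # pass 1: the key for byte i is the masked prefix sum seed + d0 + ... + d(i-1)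
--     keys = []
--     acc = seed
--     for b in data:
--         keys.append(acc)
--         acc = (acc + b) & 0xFF
--     # pass 2: obfuscate each byte with its pre-update key
--     return ''.join(_pair(b, k) for b, k in zip(data, keys))
-- ===== Notes on version B (the rewrite author's own statement) =====
-- stated objective: alternative
-- what changed: B splits A's single stateful feedback loop into two passes: it first materialises the whole key sequence as masked prefix sums of the raw bytes, then maps a pure per-(byte,key) encoder over zip(data, keys) and joins.
import Mathlib
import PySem

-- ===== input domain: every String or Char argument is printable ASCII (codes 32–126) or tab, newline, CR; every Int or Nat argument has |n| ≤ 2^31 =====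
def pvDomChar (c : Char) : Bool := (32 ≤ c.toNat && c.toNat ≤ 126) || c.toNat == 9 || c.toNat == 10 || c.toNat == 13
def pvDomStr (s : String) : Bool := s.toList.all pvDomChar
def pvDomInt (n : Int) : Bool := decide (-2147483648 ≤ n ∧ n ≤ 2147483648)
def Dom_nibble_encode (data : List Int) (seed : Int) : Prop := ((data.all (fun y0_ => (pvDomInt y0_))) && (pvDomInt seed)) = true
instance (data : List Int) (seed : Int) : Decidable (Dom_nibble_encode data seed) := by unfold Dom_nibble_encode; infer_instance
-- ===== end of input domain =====

-- B replaces A's single stateful feedback loop by two passes: a masked-prefix-sum key list, then a pure map over zip(data, keys); same cost, different decomposition.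

-- ===== PORT A =====
def pvAlphabet : List Char := "ABCDEFGHIJKLMNOPQRSTUVWXYZabcdefghijklmnopqrstuvwxyz0123456789+/".toList

def encode_byte (byte : Int) (key : Int) : Int :=
  PySem.Int.band (PySem.Int.bor ((PySem.Int.bxor byte key) >>> (3:Nat)) ((PySem.Int.bxor byte key) <<< (5:Nat))) 255

-- A's loop body: state = (encoded chars so far, feedback)
def pvStepA (st : List Char × Int) (byte : Int) : List Char × Int :=
  let ob := encode_byte byte st.2
  let hi := PySem.Int.band (ob >>> (4:Nat)) 15
  let lo := PySem.Int.band ob 15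
  (st.1 ++ [(PySem.List.pyGet? pvAlphabet hi).getD ' ', (PySem.List.pyGet? pvAlphabet lo).getD ' '],
   PySem.Int.band (st.2 + byte) 255)

def nibble_encode (data : List Int) (seed : Int) : String :=
  String.ofList (data.foldl pvStepA ([], seed)).1

-- ===== PORT B =====
-- Source B's first pass: keys[i] = (seed + data[0] + ... + data[i-1]) & 0xFF, built left to right
def pvStepKey (st : List Int × Int) (b : Int) : List Int × Int :=
  (st.1 ++ [st.2], PySem.Int.band (st.2 + b) 255)

def pvKeys (data : List Int) (seed : Int) : List Int :=
  (data.foldl pvStepKey ([], seed)).1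

-- Source B's _pair: the two output characters for one (byte, key)
def pvPair (byte : Int) (key : Int) : List Char :=
  let x := PySem.Int.bxor byte key
  let ob := PySem.Int.band (PySem.Int.bor (x >>> (3:Nat)) (x <<< (5:Nat))) 255
  [(PySem.List.pyGet? pvAlphabet (PySem.Int.band (ob >>> (4:Nat)) 15)).getD ' ',
   (PySem.List.pyGet? pvAlphabet (PySem.Int.band ob 15)).getD ' ']

def nibble_encode_alt (data : List Int) (seed : Int) : String :=
  String.ofList (((data.zip (pvKeys data seed)).map (fun p => pvPair p.1 p.2)).flatten)

-- ===== PRECONDITION & SPEC =====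
def Spec_nibble_encode (data : List Int) (seed : Int) (out : String) : Prop := out = nibble_encode_alt data seed
instance (data : List Int) (seed : Int) (out : String) : Decidable (Spec_nibble_encode data seed out) := by unfold Spec_nibble_encode; infer_instance

-- ===== CLAIM (what is proved, stated in full; the proofs are below) =====
def Claim_equal_nibble_encode : Prop := ∀ (data : List Int) (seed : Int), Dom_nibble_encode data seed → Spec_nibble_encode data seed (nibble_encode data seed)

-- ===== LEMMAS AND PROOFS =====

-- reference output: the character stream both programs produce
def pvRef (data : List Int) (seed : Int) : List Char :=
  match data with
  | [] => []
  | b :: t => pvPair b seed ++ pvRef t (PySem.Int.band (seed + b) 255)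

-- reference key list
def pvKeyRef (data : List Int) (seed : Int) : List Int :=
  match data with
  | [] => []
  | b :: t => seed :: pvKeyRef t (PySem.Int.band (seed + b) 255)

lemma foldA_eq (data : List Int) (st : List Char × Int) :
    (data.foldl pvStepA st).1 = st.1 ++ pvRef data st.2 := by
  induction data generalizing st with
  | nil => simp [pvRef]
  | cons b t ih =>
      rw [List.foldl_cons, ih]
      simp [pvStepA, pvRef, pvPair, encode_byte]

lemma foldKeys_eq (data : List Int) (st : List Int × Int) :
    (data.foldl pvStepKey st).1 = st.1 ++ pvKeyRef data st.2 := by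
  induction data generalizing st with
  | nil => simp [pvKeyRef]
  | cons b t ih =>
      rw [List.foldl_cons, ih]
      simp [pvStepKey, pvKeyRef]

lemma zip_keyRef_eq (data : List Int) (seed : Int) :
    ((data.zip (pvKeyRef data seed)).map (fun p => pvPair p.1 p.2)).flatten = pvRef data seed := by
  induction data generalizing seed with
  | nil => simp [pvKeyRef, pvRef]
  | cons b t ih =>
      simp only [pvKeyRef, pvRef, List.zip_cons_cons, List.map_cons, List.flatten_cons, ih]

-- ===== VERDICT (by name: the statement is the Claim_ definition above) =====
theorem nibble_encode_spec : Claim_equal_nibble_encode := by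
  intro data seed _
  unfold Spec_nibble_encode nibble_encode nibble_encode_alt pvKeys
  simp [foldA_eq, foldKeys_eq, zip_keyRef_eq]
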